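-- pv_equiv track=rewrite | github.com/SHIVAAKARTHIK/Basic-Python-Programs | programs/addConsecutive.py | sumTheSequenceDiff
-- ===== SOURCE A (Python) =====
-- def sumTheSequenceDiff(i,j,k):
--     total = 0
--     if i<= j and k<=j:
--         for digit_i in range(i,j):
--             total = total+digit_i
--         for digit_j in range(k,j):
--             total = total+digit_j
--         return total+j
--     else:
--         return(0)
-- ===== SOURCE B (Python) =====
-- def sumTheSequenceDiff(i, j, k):
--     if i <= j and k <= j:
--         return (i + j - 1) * (j - i) // 2 + (k + j - 1) * (j - k) // 2 + j
--     else: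
--         return 0
-- ===== Notes on version B (the rewrite author's own statement) =====
-- stated objective: faster
-- what changed: Replaced the two range-summing loops by the arithmetic-series closed form for each range, computed in O(1); intended as asymptotically faster (a timing run measured 33.72x at the largest size on inputs that reach the loops, inconsistent overall because A is already O(1) when its guard fails).
import Mathlib
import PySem

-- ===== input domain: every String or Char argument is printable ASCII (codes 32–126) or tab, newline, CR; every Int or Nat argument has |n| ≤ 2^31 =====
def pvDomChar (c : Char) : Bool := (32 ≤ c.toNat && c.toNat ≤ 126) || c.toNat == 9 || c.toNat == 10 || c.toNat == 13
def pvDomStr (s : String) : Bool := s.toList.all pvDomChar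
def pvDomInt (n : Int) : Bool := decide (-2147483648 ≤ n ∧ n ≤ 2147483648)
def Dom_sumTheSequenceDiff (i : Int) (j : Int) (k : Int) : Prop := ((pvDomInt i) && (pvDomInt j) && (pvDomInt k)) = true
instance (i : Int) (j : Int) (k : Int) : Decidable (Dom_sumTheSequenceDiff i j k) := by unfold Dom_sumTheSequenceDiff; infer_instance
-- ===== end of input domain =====

-- B replaces A's two summing loops by the arithmetic-series closed form (O(1) instead of O(j)).

-- ===== PORT A =====
def sumTheSequenceDiff (i : Int) (j : Int) (k : Int) : Int :=
  let total : Int := 0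
  if i ≤ j ∧ k ≤ j then
    let total := (PySem.List.pyRange i j 1).foldl (fun total digit_i => total + digit_i) total
    let total := (PySem.List.pyRange k j 1).foldl (fun total digit_j => total + digit_j) total
    total + j
  else
    0

-- ===== PORT B =====
def sumTheSequenceDiff_alt (i : Int) (j : Int) (k : Int) : Int :=
  if i ≤ j ∧ k ≤ j then
    PySem.Int.floordiv ((i + j - 1) * (j - i)) 2
      + PySem.Int.floordiv ((k + j - 1) * (j - k)) 2 + j
  else
    0

-- ===== PRECONDITION & SPEC =====
def Spec_sumTheSequenceDiff (i : Int) (j : Int) (k : Int) (out : Int) : Prop := out = sumTheSequenceDiff_alt i j k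
instance (i : Int) (j : Int) (k : Int) (out : Int) : Decidable (Spec_sumTheSequenceDiff i j k out) := by unfold Spec_sumTheSequenceDiff; infer_instance

-- ===== CLAIM (what is proved, stated in full; the proofs are below) =====
def Claim_equal_sumTheSequenceDiff : Prop := ∀ (i : Int) (j : Int) (k : Int), Dom_sumTheSequenceDiff i j k → Spec_sumTheSequenceDiff i j k (sumTheSequenceDiff i j k)

-- ===== LEMMAS AND PROOFS =====
theorem pv_two_mul_sum_pyRange (a b : Int) (h : a ≤ b) :
    2 * ((PySem.List.pyRange a b 1).map (fun x => x)).sum = (a + b - 1) * (b - a) := by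
  obtain ⟨n, hn⟩ : ∃ n : ℕ, b = a + n := ⟨(b - a).toNat, by omega⟩
  subst hn
  induction n with
  | zero => rw [PySem.List.pyRange_one_eq_nil (by omega)]; simp
  | succ m ih =>
    rw [show a + (↑(m + 1) : Int) = (a + m) + 1 by push_cast; ring,
        PySem.List.pyRange_one_succ_right (by omega)]
    simp only [List.map_append, List.sum_append, List.map, List.sum_cons, List.sum_nil]
    have := ih (by omega)
    push_cast at this ⊢
    ring_nf
    ring_nf at this
    omega

theorem pv_sum_loop (a b t : Int) (h : a ≤ b) :
    (PySem.List.pyRange a b 1).foldl (fun total x => total + x) t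
      = t + PySem.Int.floordiv ((a + b - 1) * (b - a)) 2 := by
  rw [show (PySem.List.pyRange a b 1).foldl (fun total x => total + x) t
        = t + ((PySem.List.pyRange a b 1).map (fun x => x)).sum from
      PySem.List.foldl_add _ _ _, PySem.Int.floordiv_eq_ediv_of_pos (by omega)]
  have := pv_two_mul_sum_pyRange a b h
  omega

-- ===== VERDICT (by name: the statement is the Claim_ definition above) =====
theorem sumTheSequenceDiff_spec : Claim_equal_sumTheSequenceDiff := by
  intro i j k _
  unfold Spec_sumTheSequenceDiff sumTheSequenceDiff sumTheSequenceDiff_alt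
  by_cases h : i ≤ j ∧ k ≤ j
  · simp only [h]
    rw [pv_sum_loop i j 0 h.1, pv_sum_loop k j _ h.2]
    ring
  · simp [h]
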